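-- pv_equiv track=rewrite | github.com/choco9966/Algorithm-Master | elice/알고리즘1/재귀호출/[ADV 2] 가로수.py | howManyTree
-- ===== SOURCE A (Python) =====
-- def gcd(n,m) :
--     while m!=0 :
--         n,m = m,n%m
--     return n
--
-- def howManyTree(n, myInput) :
--     '''
--     모든 가로수가 같은 간격이 되도록 새로 심어야 하는 가로수의 최소수를 리턴하는 함수를 구현하세요.
--     '''
--
--     diff = []
--     cnt = 0
--
--     myInput.sort()
--
--     for i in range(1,len(myInput)) :
--         diff.append(myInput[i] - myInput[i-1])
--
--     diff.sort()
--
--     GCD = diff[0]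
--
--     for x in diff :
--         GCD = gcd(GCD,x)
--     for x in diff :
--         cnt += x//GCD-1
--
--     return cnt
-- ===== SOURCE B (Python) =====
-- def gcd(n, m):
--     return n if m == 0 else gcd(m, n % m)
--
-- def howManyTree(n, myInput):
--     myInput.sort()
--     diffs = [b - a for a, b in zip(myInput, myInput[1:])]
--     g = diffs[0]
--     for d in diffs[1:]:
--         g = gcd(g, d)
--     return (myInput[-1] - myInput[0]) // g - (len(myInput) - 1)
-- ===== Notes on version B (the rewrite author's own statement) =====
-- stated objective: simpler
-- what changed: B drops A's second sort and the final counting loop, computing the answer by the closed form (max - min)//gcd - (len - 1) from a single gcd reduction over the consecutive differences (recursive gcd instead of the while loop).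
import Mathlib
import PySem

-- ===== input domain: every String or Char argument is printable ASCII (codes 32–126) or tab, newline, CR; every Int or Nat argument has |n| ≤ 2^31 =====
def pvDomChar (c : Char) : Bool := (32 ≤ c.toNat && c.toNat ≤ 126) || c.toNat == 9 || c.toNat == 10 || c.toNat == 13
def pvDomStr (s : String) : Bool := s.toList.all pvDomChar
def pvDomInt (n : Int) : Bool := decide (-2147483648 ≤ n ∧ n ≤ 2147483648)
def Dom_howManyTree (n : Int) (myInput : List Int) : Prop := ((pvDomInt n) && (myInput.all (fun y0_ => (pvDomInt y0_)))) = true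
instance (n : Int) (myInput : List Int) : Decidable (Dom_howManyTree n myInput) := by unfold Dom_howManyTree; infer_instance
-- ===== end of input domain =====

-- B replaces A's second sort and counting loop by the closed form (max-min)//gcd - (len-1); return-value
-- equivalence only: both A and B sort myInput in place (B performs the same mutation).

-- ===== PORT A =====
-- A's helper gcd(n, m): the while loop as tail recursion (PySem.Int.mod = Python's %)
def gcdA (a b : Int) : Int :=
  if h : b = 0 then a else gcdA b (PySem.Int.mod a b)
termination_by b.natAbs
decreasing_by
  rcases lt_or_gt_of_ne h with hb | hb
  · have h1 := (PySem.Int.mod_neg_bounds a hb).1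
    have h2 := (PySem.Int.mod_neg_bounds a hb).2
    omega
  · have h1 := PySem.Int.mod_nonneg a hb
    have h2 := PySem.Int.mod_lt a hb
    omega

def howManyTree (n : Int) (myInput : List Int) : Int :=
  let s := PySem.List.sorted myInput (fun x => x) false            -- myInput.sort()
  let diff := (PySem.List.pyRange 1 (s.length : Int) 1).foldl      -- for i in range(1, len(myInput)):
    (fun d i => d ++ [PySem.List.pyGetD s i 0 - PySem.List.pyGetD s (i - 1) 0]) []  -- indices always in range
  let diffS := PySem.List.sorted diff (fun x => x) false           -- diff.sort()
  let g0 := PySem.List.pyGetD diffS 0 0                            -- diff[0]; IndexError on [] — excluded by Pre_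
  let g := diffS.foldl (fun G x => gcdA G x) g0                    -- for x in diff: GCD = gcd(GCD, x)
  diffS.foldl (fun cnt x => cnt + (PySem.Int.floordiv x g - 1)) 0  -- cnt += x//GCD - 1; GCD = 0 excluded by Pre_

-- ===== PORT B =====
-- B's helper gcd(a, b): the recursive one-liner
def gcdB (a b : Int) : Int :=
  if h : b = 0 then a else gcdB b (PySem.Int.mod a b)
termination_by b.natAbs
decreasing_by
  rcases lt_or_gt_of_ne h with hb | hb
  · have h1 := (PySem.Int.mod_neg_bounds a hb).1
    have h2 := (PySem.Int.mod_neg_bounds a hb).2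
    omega
  · have h1 := PySem.Int.mod_nonneg a hb
    have h2 := PySem.Int.mod_lt a hb
    omega

def howManyTree_alt (n : Int) (myInput : List Int) : Int :=
  let s := PySem.List.sorted myInput (fun x => x) false                        -- myInput.sort()
  let diffs := (s.zip (PySem.List.slice s (some 1) none)).map (fun p => p.2 - p.1)  -- [b-a for a,b in zip(s, s[1:])]
  let g := (PySem.List.slice diffs (some 1) none).foldl                        -- for d in diffs[1:]:
    (fun G d => gcdB G d) (PySem.List.pyGetD diffs 0 0)                        -- g = gcd(g, d); diffs[0] raises on [] — excluded by Pre_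
  PySem.Int.floordiv (PySem.List.pyGetD s (-1) 0 - PySem.List.pyGetD s 0 0) g
    - ((myInput.length : Int) - 1)

-- ===== PRECONDITION & SPEC =====
-- Pre_ excludes exactly the inputs where A raises: fewer than two positions (diff[0] → IndexError)
-- and all positions equal (GCD = 0 → ZeroDivisionError). B raises there too.
def Pre_howManyTree (n : Int) (myInput : List Int) : Prop :=
  2 ≤ myInput.length ∧ ∃ x ∈ myInput, ∃ y ∈ myInput, x ≠ y
instance (n : Int) (myInput : List Int) : Decidable (Pre_howManyTree n myInput) := by
  unfold Pre_howManyTree; infer_instance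
def pvWitness_howManyTree : Int × List Int := (3, [1, 7, 3])

def Spec_howManyTree (n : Int) (myInput : List Int) (out : Int) : Prop := out = howManyTree_alt n myInput
instance (n : Int) (myInput : List Int) (out : Int) : Decidable (Spec_howManyTree n myInput out) := by unfold Spec_howManyTree; infer_instance

-- ===== CLAIM (what is proved, stated in full; the proofs are below) =====
def Claim_equal_howManyTree : Prop := ∀ (n : Int) (myInput : List Int), Dom_howManyTree n myInput → Pre_howManyTree n myInput → Spec_howManyTree n myInput (howManyTree n myInput)

-- ===== LEMMAS AND PROOFS =====

-- the list of consecutive differences of s (B's diffs, with s[1:] already rewritten to drop 1)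
def dlist (s : List Int) : List Int := (s.zip (s.drop 1)).map (fun p => p.2 - p.1)

theorem dlist_length (s : List Int) : (dlist s).length = s.length - 1 := by
  simp [dlist]

-- A's diff-building loop produces exactly dlist s
theorem diff_loop_eq_dlist (s : List Int) :
    (PySem.List.pyRange 1 (s.length : Int) 1).foldl
      (fun d i => d ++ [PySem.List.pyGetD s i 0 - PySem.List.pyGetD s (i - 1) 0]) []
    = dlist s := by
  rw [PySem.List.foldl_append_singleton_eq_map, List.nil_append]
  apply List.ext_getElem
  · simp [dlist, PySem.List.length_pyRange_one]
  · intro k h1 h2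
    simp only [List.getElem_map, PySem.List.getElem_pyRange_one, dlist, List.getElem_zip,
      List.getElem_drop]
    have hk : k + 1 < s.length := by
      have := h1; simp [PySem.List.length_pyRange_one] at this; omega
    have e1 : (1 : Int) + (k : Int) = ((k + 1 : Nat) : Int) := by push_cast; ring
    have e2 : ((k + 1 : Nat) : Int) - 1 = ((k : Nat) : Int) := by push_cast; ring
    rw [e1, e2, PySem.List.pyGetD_natCast, PySem.List.pyGetD_natCast]
    simp [List.getD_eq_getElem?_getD, hk, Nat.lt_of_succ_lt hk,
      Nat.add_comm]

-- consecutive differences of a sorted list are nonnegative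
theorem dlist_nonneg (s : List Int) (hs : s.Pairwise (· ≤ ·)) : ∀ d ∈ dlist s, 0 ≤ d := by
  induction s with
  | nil => simp [dlist]
  | cons a t ih =>
    cases t with
    | nil => simp [dlist]
    | cons b u =>
      intro d hd
      simp only [dlist, List.drop_succ_cons, List.drop_zero, List.zip_cons_cons,
        List.map_cons, List.mem_cons] at hd
      rcases hd with h | h
      · have hab : a ≤ b := (List.pairwise_cons.mp hs).1 b (by simp)
        omega
      · exact ih (List.pairwise_cons.mp hs).2 d (by simpa [dlist] using h)

-- if every consecutive difference is zero, the list is constant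
theorem const_of_dlist_zero (s : List Int) (h : ∀ d ∈ dlist s, d = 0) :
    ∀ x ∈ s, ∀ y ∈ s, x = y := by
  induction s with
  | nil => simp
  | cons a t ih =>
    cases t with
    | nil => simp
    | cons b u =>
      simp only [dlist, List.drop_succ_cons, List.drop_zero, List.zip_cons_cons,
        List.map_cons, List.mem_cons] at h
      have hab : b - a = 0 := h _ (Or.inl rfl)
      have hrest : ∀ x ∈ b :: u, ∀ y ∈ b :: u, x = y :=
        ih (fun d hd => h d (Or.inr (by simpa [dlist] using hd)))
      intro x hx y hy
      rcases List.mem_cons.mp hx with hx | hx <;> rcases List.mem_cons.mp hy with hy | hy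
      · rw [hx, hy]
      · rw [hx]; have := hrest y hy b (by simp); omega
      · rw [hy]; have := hrest x hx b (by simp); omega
      · exact hrest x hx y hy

-- telescoping sum
theorem dlist_sum (s : List Int) (h : s ≠ []) : (dlist s).sum = s.getLast h - s.head h := by
  induction s with
  | nil => exact absurd rfl h
  | cons a t ih =>
    cases t with
    | nil => simp [dlist]
    | cons b u =>
      have ht : (b :: u) ≠ [] := by simp
      have := ih ht
      simp only [dlist, List.drop_succ_cons, List.drop_zero, List.zip_cons_cons,
        List.map_cons, List.sum_cons] at this ⊢
      rw [List.getLast_cons ht, this]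
      simp

-- the ported while/recursive gcd equals Int.gcd on nonnegative arguments
theorem gcdA_eq_gcd (a b : Int) (ha : 0 ≤ a) (hb : 0 ≤ b) : gcdA a b = ↑(Int.gcd a b) := by
  by_cases h0 : b = 0
  · subst h0
    rw [gcdA, dif_pos rfl]
    have : a.natAbs = a.toNat := by omega
    simp [Int.gcd, this, Int.toNat_of_nonneg ha]
  · have hbpos : 0 < b := lt_of_le_of_ne hb (Ne.symm h0)
    have hm : PySem.Int.mod a b = a % b := PySem.Int.mod_eq_emod_of_pos (a := a) hbpos
    have hmn : 0 ≤ a % b := Int.emod_nonneg a h0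
    have hrec := gcdA_eq_gcd b (a % b) hb hmn
    rw [gcdA, dif_neg h0, hm, hrec, Int.gcd_comm, Int.gcd_emod]
termination_by b.natAbs
decreasing_by
  have h1 := PySem.Int.mod_nonneg (a := a) hbpos
  have h2 := PySem.Int.mod_lt (a := a) hbpos
  omega

theorem gcdB_eq_gcdA (a b : Int) : gcdB a b = gcdA a b := by
  by_cases h0 : b = 0
  · rw [gcdB, gcdA, dif_pos h0, dif_pos h0]
  · rw [gcdB, gcdA, dif_neg h0, dif_neg h0, gcdB_eq_gcdA]
termination_by b.natAbs
decreasing_by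
  rcases lt_or_gt_of_ne h0 with hb | hb
  · have h1 := (PySem.Int.mod_neg_bounds a hb).1
    have h2 := (PySem.Int.mod_neg_bounds a hb).2
    omega
  · have h1 := PySem.Int.mod_nonneg a hb
    have h2 := PySem.Int.mod_lt a hb
    omega

-- folding gcdA over a nonnegative list is the Nat.gcd fold on the toNat image
theorem foldl_gcdA_eq (l : List Int) (hl : ∀ x ∈ l, 0 ≤ x) :
    ∀ a : Int, 0 ≤ a → l.foldl gcdA a = ↑((l.map Int.toNat).foldl Nat.gcd a.toNat) := by
  induction l with
  | nil => intro a ha; simp [Int.toNat_of_nonneg ha]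
  | cons x t ih =>
    intro a ha
    have hx : 0 ≤ x := hl x (by simp)
    have hg : gcdA a x = ↑(Nat.gcd a.toNat x.toNat) := by
      rw [gcdA_eq_gcd a x ha hx]
      have h1 : a.natAbs = a.toNat := by omega
      have h2 : x.natAbs = x.toNat := by omega
      simp [Int.gcd, h1, h2]
    simp only [List.foldl_cons, List.map_cons, hg]
    rw [ih (fun y hy => hl y (by simp [hy])) _ (Int.natCast_nonneg _)]
    simp

theorem foldl_gcd_eq_gcd_foldr (l : List Nat) (m : Nat) :
    l.foldl Nat.gcd m = Nat.gcd m (l.foldr Nat.gcd 0) := by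
  induction l generalizing m with
  | nil => simp
  | cons x t ih => simp only [List.foldl_cons, List.foldr_cons, ih, Nat.gcd_assoc]

theorem foldr_gcd_dvd (l : List Nat) : ∀ x ∈ l, l.foldr Nat.gcd 0 ∣ x := by
  induction l with
  | nil => simp
  | cons y t ih =>
    intro x hx
    rcases List.mem_cons.mp hx with h | h
    · rw [h]; exact Nat.gcd_dvd_left _ _
    · exact dvd_trans (Nat.gcd_dvd_right _ _) (ih x h)

theorem foldr_gcd_eq_zero (l : List Nat) (h : l.foldr Nat.gcd 0 = 0) : ∀ x ∈ l, x = 0 := by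
  induction l with
  | nil => simp
  | cons y t ih =>
    simp only [List.foldr_cons] at h
    have := Nat.gcd_eq_zero_iff.mp h
    intro x hx
    rcases List.mem_cons.mp hx with h' | h'
    · rw [h', this.1]
    · exact ih this.2 x h'

theorem sum_map_div (l : List Nat) (G : Nat) (hG : 0 < G) (h : ∀ x ∈ l, G ∣ x) :
    (l.map (· / G)).sum = l.sum / G := by
  induction l with
  | nil => simp
  | cons x t ih =>
    obtain ⟨k, hk⟩ := h x (by simp)
    simp only [List.map_cons, List.sum_cons, hk,
      ih (fun y hy => h y (by simp [hy]))]
    rw [Nat.mul_add_div hG, Nat.mul_div_cancel_left _ hG]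

theorem sum_map_sub_one (l : List Int) (f : Int → Int) :
    (l.map (fun x => f x - 1)).sum = (l.map f).sum - l.length := by
  induction l with
  | nil => simp
  | cons x t ih => simp only [List.map_cons, List.sum_cons, ih, List.length_cons]; push_cast; ring

theorem pyGetD_zero_head (l : List Int) (h : l ≠ []) :
    PySem.List.pyGetD l 0 0 = l.head h := by
  cases l with
  | nil => exact absurd rfl h
  | cons a t => rw [PySem.List.pyGetD_zero_cons]; rfl

-- ===== VERDICT (by name: the statement is the Claim_ definition above) =====
theorem howManyTree_spec : Claim_equal_howManyTree := by
  intro n myInput _ hpre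
  obtain ⟨hlen2, x, hx, y, hy, hxy⟩ := hpre
  unfold Spec_howManyTree
  simp only [howManyTree, howManyTree_alt]
  set s : List Int := PySem.List.sorted myInput (fun x => x) false with hs
  rw [diff_loop_eq_dlist, PySem.List.slice_from s (by norm_num),
    show ((1:Int).toNat = 1) from rfl,
    show (s.zip (s.drop 1)).map (fun p => p.2 - p.1) = dlist s from rfl]
  -- basic facts about s and its difference list L
  have hperm : s.Perm myInput := PySem.List.sorted_perm myInput (fun x => x) false
  have hslen : s.length = myInput.length := hperm.length_eq
  have hsne : s ≠ [] := by
    intro hnil; rw [hnil] at hslen; simp at hslen; omega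
  have hpair : s.Pairwise (· ≤ ·) := PySem.List.sorted_pairwise myInput (fun x => x)
  set L : List Int := dlist s with hLdef
  have hLlen : L.length = s.length - 1 := dlist_length s
  have hLne : L ≠ [] := by
    intro hnil; rw [hnil] at hLlen; simp at hLlen; omega
  have hLnn : ∀ d ∈ L, 0 ≤ d := dlist_nonneg s hpair
  -- some difference is nonzero (two distinct values occur in myInput, hence in s)
  have hne0 : ∃ d ∈ L, d ≠ 0 := by
    by_contra hall
    simp only [not_exists, not_and, not_not, ne_eq] at hall
    have hconst := const_of_dlist_zero s hall
    exact hxy (hconst x (hperm.mem_iff.mpr hx) y (hperm.mem_iff.mpr hy))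
  -- the Nat-level gcd of all differences
  set N : List Nat := L.map Int.toNat with hNdef
  set G : Nat := N.foldr Nat.gcd 0 with hGdef
  have hGdvd : ∀ m ∈ N, G ∣ m := foldr_gcd_dvd N
  have hGpos : 0 < G := by
    rcases hne0 with ⟨d, hd, hdne⟩
    rcases Nat.eq_zero_or_pos G with h0 | h
    · have := foldr_gcd_eq_zero N h0 d.toNat (List.mem_map_of_mem hd)
      have := hLnn d hd
      omega
    · exact h
  -- both gcd folds compute ↑G
  set SL : List Int := PySem.List.sorted L (fun x => x) false with hSLdef
  have hSLperm : SL.Perm L := PySem.List.sorted_perm L (fun x => x) false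
  have hSLnn : ∀ d ∈ SL, 0 ≤ d := fun d hd => hLnn d (hSLperm.mem_iff.mp hd)
  have hNperm : (SL.map Int.toNat).Perm N := hSLperm.map Int.toNat
  have hSLne : SL ≠ [] := by
    intro hnil
    exact hLne ((PySem.List.sorted_eq_nil_iff L (fun x => x) false).mp hnil)
  obtain ⟨h₁, t₁, hSL1⟩ := List.exists_cons_of_ne_nil hSLne
  obtain ⟨h₂, t₂, hL2⟩ := List.exists_cons_of_ne_nil hLne
  have hgA : SL.foldl (fun G x => gcdA G x) (PySem.List.pyGetD SL 0 0) = (G : Int) := by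
    rw [hSL1, PySem.List.pyGetD_zero_cons]
    have hh : 0 ≤ h₁ := hSLnn h₁ (by rw [hSL1]; simp)
    rw [show (h₁ :: t₁).foldl (fun G x => gcdA G x) h₁
        = ((((h₁ :: t₁).map Int.toNat).foldl Nat.gcd h₁.toNat : Nat) : Int)
      from foldl_gcdA_eq (h₁ :: t₁) (by rw [← hSL1]; exact hSLnn) h₁ hh]
    simp only [List.map_cons, List.foldl_cons, Nat.gcd_self]
    rw [foldl_gcd_eq_gcd_foldr]
    rw [show Nat.gcd h₁.toNat (List.foldr Nat.gcd 0 (t₁.map Int.toNat))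
        = List.foldr Nat.gcd 0 ((h₁ :: t₁).map Int.toNat) from by simp]
    rw [← hSL1, List.Perm.foldr_eq hNperm 0, ← hGdef]
  have hgB : (PySem.List.slice L (some 1) none).foldl (fun G d => gcdB G d)
      (PySem.List.pyGetD L 0 0) = (G : Int) := by
    rw [PySem.List.slice_from L (by norm_num), show ((1:Int).toNat = 1) from rfl]
    rw [hL2, List.drop_one, List.tail_cons, PySem.List.pyGetD_zero_cons]
    have hh : 0 ≤ h₂ := hLnn h₂ (by rw [hL2]; simp)
    have hbc : t₂.foldl (fun G d => gcdB G d) h₂ = t₂.foldl gcdA h₂ := by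
      apply PySem.List.foldl_congr_mem
      intro acc z _
      exact gcdB_eq_gcdA acc z
    rw [hbc]
    rw [show t₂.foldl gcdA h₂ = (((t₂.map Int.toNat).foldl Nat.gcd h₂.toNat : Nat) : Int)
      from foldl_gcdA_eq t₂ (fun z hz => hLnn z (by rw [hL2]; simp [hz])) h₂ hh]
    rw [foldl_gcd_eq_gcd_foldr]
    rw [show Nat.gcd h₂.toNat (List.foldr Nat.gcd 0 (t₂.map Int.toNat))
        = List.foldr Nat.gcd 0 ((h₂ :: t₂).map Int.toNat) from by simp]
    rw [← hL2, ← hNdef, ← hGdef]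
  rw [hgA, hgB]
  -- A's counting loop becomes a sum over SL, then over L
  rw [PySem.List.foldl_add SL (fun x => PySem.Int.floordiv x (G : Int) - 1) 0]
  rw [List.Perm.sum_eq (hSLperm.map (fun x => PySem.Int.floordiv x (G : Int) - 1))]
  rw [sum_map_sub_one]
  have hmapdiv : L.map (fun x => PySem.Int.floordiv x (G : Int))
      = (N.map (· / G)).map (Nat.cast : Nat → Int) := by
    rw [hNdef, List.map_map, List.map_map]
    apply List.map_congr_left
    intro d hd
    have hd0 : 0 ≤ d := hLnn d hd
    have : d = ((d.toNat : Nat) : Int) := (Int.toNat_of_nonneg hd0).symm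
    rw [this]
    simp only [Function.comp]
    rw [PySem.Int.floordiv_natCast]
    simp
  rw [hmapdiv, ← Nat.cast_list_sum, sum_map_div N G hGpos hGdvd]
  -- B's closed form: telescoping numerator
  have hlast : PySem.List.pyGetD s (-1) 0 = s.getLast hsne := PySem.List.pyGetD_neg_one s 0 hsne
  have hhead : PySem.List.pyGetD s 0 0 = s.head hsne := pyGetD_zero_head s hsne
  have hsum : s.getLast hsne - s.head hsne = ((N.sum : Nat) : Int) := by
    rw [← dlist_sum s hsne, ← hLdef, hNdef]
    rw [Nat.cast_list_sum]
    rw [show List.map Nat.cast (L.map Int.toNat) = L.map (fun d => ((d.toNat : Nat) : Int)) from by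
      rw [List.map_map]; rfl]
    rw [List.map_congr_left (fun d hd => Int.toNat_of_nonneg (hLnn d hd))]
    simp
  rw [hlast, hhead, hsum, PySem.Int.floordiv_natCast]
  -- lengths agree
  have : (L.length : Int) = (myInput.length : Int) - 1 := by
    have := hLlen; have := hslen; omega
  rw [this]
  ring
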